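-- pv_equiv track=rewrite | github.com/abau171/projecteuler | solutions/p26.py | denom_with_largest_cycle
-- ===== SOURCE A (Python) =====
-- def split_fraction(d):
-- 	next_n = 1
-- 	n = None
-- 	n_map = dict()
-- 	looping = False
-- 	while not looping:
-- 		n = next_n
-- 		next_n = (10 * n) % d
-- 		if next_n == 0:
-- 			n_map[n] = None
-- 			break
-- 		if n in n_map:
-- 			looping = True
-- 		n_map[n] = next_n
-- 	loop_start = n if looping else None
-- 	n = 1
-- 	head = []
-- 	loop = []
-- 	while n != loop_start:
-- 		head.append((10 * n) // d)
-- 		n = n_map[n]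
-- 	if looping:
-- 		loop.append((10 * n) // d)
-- 		n = n_map[n]
-- 		while n != loop_start:
-- 			loop.append((10 * n) // d)
-- 			n = n_map[n]
-- 	return head, loop
--
-- def denom_with_largest_cycle(upper_bound):
--     largest_cycle_length = -1
--     cycle_d = None
--     for d in range(2, upper_bound):
--         head, loop = split_fraction(d)
--         cycle_length = len(loop)
--         if cycle_length > largest_cycle_length:
--             largest_cycle_length = cycle_length
--             cycle_d = d
--     return cycle_d
-- ===== SOURCE B (Python) =====
-- def _strip(m, p):
--     while m % p == 0:
--         m //= p
--     return m
--
-- def denom_with_largest_cycle(upper_bound):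
--     largest_cycle_length = -1
--     cycle_d = None
--     for d in range(2, upper_bound):
--         m = _strip(_strip(d, 2), 5)
--         if m == 1:
--             cycle_length = 0
--         else:
--             r = 10 % m
--             cycle_length = 1
--             while r != 1:
--                 r = (10 * r) % m
--                 cycle_length += 1
--         if cycle_length > largest_cycle_length:
--             largest_cycle_length = cycle_length
--             cycle_d = d
--     return cycle_d
-- ===== Notes on version B (the rewrite author's own statement) =====
-- stated objective: alternative
-- what changed: Replaces building a remainder->remainder dict and walking it to extract head/loop digit lists with number theory: strip factors 2 and 5 from d, then the cycle length is the multiplicative order of 10 modulo the stripped part (0 if it is 1), computed by a single modular counting loop.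
import Mathlib
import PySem

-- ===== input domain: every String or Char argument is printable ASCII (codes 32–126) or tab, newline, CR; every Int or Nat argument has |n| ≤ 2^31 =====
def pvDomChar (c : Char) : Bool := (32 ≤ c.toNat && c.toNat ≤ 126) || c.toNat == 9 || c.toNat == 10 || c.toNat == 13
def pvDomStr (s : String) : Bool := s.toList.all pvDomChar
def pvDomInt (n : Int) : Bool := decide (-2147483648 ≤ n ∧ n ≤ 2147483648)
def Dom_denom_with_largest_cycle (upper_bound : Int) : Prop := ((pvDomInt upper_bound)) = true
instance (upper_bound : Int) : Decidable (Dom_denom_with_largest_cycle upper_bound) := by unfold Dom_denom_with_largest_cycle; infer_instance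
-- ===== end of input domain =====

-- B replaces A's remainder->remainder dict and head/loop digit-list walks by number theory:
-- strip the factors 2 and 5 from d; the cycle length is then the multiplicative order of 10
-- modulo the stripped part (a different algorithm of similar cost).


-- ===== PORT A =====
-- the n_map-building while loop (fuel d.toNat+2 always suffices: the proof shows the loop
-- stops within d.toNat+1 iterations, so the 0-fuel row is never reached for d ≥ 2)
def sfLoop1 (d : Int) : Nat → Int → Option Int → PySem.Dict Int (Option Int) → Bool →
    (Option Int × PySem.Dict Int (Option Int) × Bool)
  | 0, _, n, n_map, looping => (n, n_map, looping)
  | fuel+1, next_n, n, n_map, looping =>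
    if looping then (n, n_map, looping)
    else
      let n1 := next_n
      let next1 := PySem.Int.mod (10 * n1) d
      if next1 = 0 then (some n1, n_map.insert n1 none, false)
      else sfLoop1 d fuel next1 (some n1) (n_map.insert n1 (some next1)) ((n_map.get? n1).isSome)

-- the two digit-collecting while loops share this shape: append a digit, n = n_map[n].
-- A missing key (Python: KeyError) and the `none` row reached with n ≠ loop_start (Python:
-- TypeError on 10*None) are unreachable in the calls split_fraction makes (proved below).
def sfWalk (d : Int) (n_map : PySem.Dict Int (Option Int)) (stop : Option Int) :
    Nat → Option Int → List Int → (Option Int × List Int)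
  | 0, n, acc => (n, acc)
  | fuel+1, n, acc =>
    if n = stop then (n, acc)
    else
      match n with
      | some v => sfWalk d n_map stop fuel ((n_map.get? v).getD none)
                    (acc ++ [PySem.Int.floordiv (10 * v) d])
      | none => (n, acc)

def split_fraction (d : Int) : List Int × List Int :=
  let fuel := d.toNat + 2
  let r1 := sfLoop1 d fuel 1 none PySem.Dict.empty false
  let n_map := r1.2.1
  let looping := r1.2.2
  let loop_start : Option Int := if looping then r1.1 else none
  let r2 := sfWalk d n_map loop_start fuel (some 1) []
  let head := r2.2
  if looping then
    match r2.1 with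
    | some v =>
      let loop := (sfWalk d n_map loop_start fuel ((n_map.get? v).getD none)
          [PySem.Int.floordiv (10 * v) d]).2
      (head, loop)
    | none => (head, [])
  else (head, [])

def denom_with_largest_cycle (upper_bound : Int) : Option Int :=
  ((PySem.List.pyRange 2 upper_bound 1).foldl
    (fun st d =>
      let cycle_length : Int := ((split_fraction d).2.length : Int)
      if cycle_length > st.1 then (cycle_length, some d) else st)
    (-1, none)).2

-- ===== PORT B =====
-- Source B's helper _strip(m, p): while m % p == 0: m //= p  (fuel d.toNat+2 always suffices)
def stripFac (p : Int) : Nat → Int → Int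
  | 0, m => m
  | fuel+1, m => if PySem.Int.mod m p = 0 then stripFac p fuel (PySem.Int.floordiv m p) else m

-- Source B's `while r != 1` loop counting the multiplicative order of 10 mod m
def ordLoop (m : Int) : Nat → Int → Int → Int
  | 0, _, cl => cl
  | fuel+1, r, cl => if r = 1 then cl else ordLoop m fuel (PySem.Int.mod (10 * r) m) (cl + 1)

def cycleLenAlt (d : Int) : Int :=
  let m := stripFac 5 (d.toNat + 2) (stripFac 2 (d.toNat + 2) d)
  if m = 1 then 0
  else ordLoop m (m.toNat + 2) (PySem.Int.mod 10 m) 1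

def denom_with_largest_cycle_alt (upper_bound : Int) : Option Int :=
  ((PySem.List.pyRange 2 upper_bound 1).foldl
    (fun st d =>
      let cycle_length := cycleLenAlt d
      if cycle_length > st.1 then (cycle_length, some d) else st)
    (-1, none)).2

-- ===== PRECONDITION & SPEC =====
def Spec_denom_with_largest_cycle (upper_bound : Int) (out : Option Int) : Prop := out = denom_with_largest_cycle_alt upper_bound
instance (upper_bound : Int) (out : Option Int) : Decidable (Spec_denom_with_largest_cycle upper_bound out) := by unfold Spec_denom_with_largest_cycle; infer_instance

-- ===== CLAIM (what is proved, stated in full; the proofs are below) =====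
def Claim_equal_denom_with_largest_cycle : Prop := ∀ (upper_bound : Int), Dom_denom_with_largest_cycle upper_bound → Spec_denom_with_largest_cycle upper_bound (denom_with_largest_cycle upper_bound)

-- ===== LEMMAS AND PROOFS =====
-- the remainder sequence 10^k mod D, and the event that ends A's first while loop
def aN (D k : Nat) : Nat := 10 ^ k % D
def aI (d : Int) (k : Nat) : Int := ((aN d.toNat k : Nat) : Int)
def EV (D j : Nat) : Prop := aN D (j+1) = 0 ∨ ∃ i, i < j ∧ aN D i = aN D j

lemma aN_succ (D k : Nat) : aN D (k+1) = 10 * aN D k % D := by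
  unfold aN
  rw [pow_succ, mul_comm]
  exact (Nat.ModEq.mul_left 10 (Nat.mod_modEq (10 ^ k) D)).symm

lemma aI_step (d : Int) (hd : 2 ≤ d) (k : Nat) :
    PySem.Int.mod (10 * aI d k) d = aI d (k+1) := by
  obtain ⟨D, rfl⟩ : ∃ D : Nat, d = (D : Int) := ⟨d.toNat, (Int.toNat_of_nonneg (by omega)).symm⟩
  rw [PySem.Int.mod_eq_emod_of_pos (show (0:Int) < (D:Int) by omega)]
  unfold aI
  rw [Int.toNat_natCast, aN_succ]
  norm_cast

lemma pigeon (n : Nat) (hn : 1 ≤ n) :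
    ∃ i j, i < j ∧ j ≤ n ∧ 10 ^ i % n = 10 ^ j % n := by
  have h : Fintype.card (Fin n) < Fintype.card (Fin (n+1)) := by simp
  obtain ⟨x, y, hne, heq⟩ := Fintype.exists_ne_map_eq_of_card_lt
    (fun k : Fin (n+1) => (⟨10 ^ (k : Nat) % n, Nat.mod_lt _ (by omega)⟩ : Fin n)) h
  have heq' : 10 ^ (x : Nat) % n = 10 ^ (y : Nat) % n := by
    simpa using congrArg Fin.val heq
  rcases Nat.lt_or_ge (x : Nat) (y : Nat) with hlt | hge
  · exact ⟨x, y, hlt, by omega, heq'⟩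
  · have hlt : (y : Nat) < (x : Nat) := by
      rcases Nat.lt_or_ge (y : Nat) (x : Nat) with h' | h'
      · exact h'
      · exact absurd (Fin.val_injective (by omega)) hne
    exact ⟨y, x, hlt, by omega, heq'.symm⟩

lemma copM10pow (MN : Nat) (h2 : ¬ 2 ∣ MN) (h5 : ¬ 5 ∣ MN) (i : Nat) :
    Nat.Coprime MN (10 ^ i) := by
  have c10 : Nat.Coprime MN 10 := by
    have : (10 : Nat) = 2 * 5 := by norm_num
    rw [this]
    exact Nat.Coprime.mul_right
      (((Nat.Prime.coprime_iff_not_dvd Nat.prime_two).2 h2).symm)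
      (((Nat.Prime.coprime_iff_not_dvd (by norm_num)).2 h5).symm)
  exact Nat.Coprime.pow_right i c10

lemma copE_sub1 (a b k : Nat) (hk : 1 ≤ k) : Nat.Coprime (2 ^ a * 5 ^ b) (10 ^ k - 1) := by
  have hpow : 1 ≤ (10:Nat) ^ k := Nat.one_le_pow _ _ (by norm_num)
  have c2 : Nat.Coprime 2 (10 ^ k - 1) := by
    rw [Nat.Prime.coprime_iff_not_dvd Nat.prime_two]
    intro hdvd
    have h1 : (2:Nat) ∣ 10 ^ k := dvd_pow (by norm_num) (by omega)
    have := Nat.dvd_sub h1 hdvd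
    omega
  have c5 : Nat.Coprime 5 (10 ^ k - 1) := by
    rw [Nat.Prime.coprime_iff_not_dvd (by norm_num)]
    intro hdvd
    have h1 : (5:Nat) ∣ 10 ^ k := dvd_pow (by norm_num) (by omega)
    have := Nat.dvd_sub h1 hdvd
    omega
  exact Nat.Coprime.mul (Nat.Coprime.pow_left a c2) (Nat.Coprime.pow_left b c5)

lemma key_iff (D a b MN : Nat) (hdec : D = 2 ^ a * 5 ^ b * MN)
    (h2 : ¬ 2 ∣ MN) (h5 : ¬ 5 ∣ MN) (i k : Nat) (hk : 1 ≤ k) :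
    D ∣ 10 ^ i * (10 ^ k - 1) ↔ (2 ^ a * 5 ^ b ∣ 10 ^ i ∧ MN ∣ 10 ^ k - 1) := by
  subst hdec
  constructor
  · intro h
    have hE : 2 ^ a * 5 ^ b ∣ 10 ^ i * (10 ^ k - 1) := dvd_trans (Dvd.intro _ rfl) h
    have hM : MN ∣ 10 ^ i * (10 ^ k - 1) := dvd_trans (Dvd.intro_left _ rfl) h
    exact ⟨(copE_sub1 a b k hk).dvd_of_dvd_mul_right hE,
           ((copM10pow MN h2 h5 i).dvd_of_dvd_mul_left hM)⟩
  · rintro ⟨hE, hM⟩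
    exact Nat.mul_dvd_mul hE hM

lemma rep_iff (D a b MN : Nat) (hdec : D = 2 ^ a * 5 ^ b * MN)
    (h2 : ¬ 2 ∣ MN) (h5 : ¬ 5 ∣ MN) (i j : Nat) (hij : i < j) :
    aN D i = aN D j ↔ (2 ^ a * 5 ^ b ∣ 10 ^ i ∧ MN ∣ 10 ^ (j - i) - 1) := by
  have hle : (10:Nat) ^ i ≤ 10 ^ j := Nat.pow_le_pow_right (by norm_num) (by omega)
  have hsub : 10 ^ j - 10 ^ i = 10 ^ i * (10 ^ (j - i) - 1) := by
    have hij' : i + (j - i) = j := by omega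
    rw [Nat.mul_sub, mul_one, ← pow_add, hij']
  have h1 : aN D i = aN D j ↔ D ∣ 10 ^ j - 10 ^ i := Nat.modEq_iff_dvd' hle
  rw [h1, hsub]
  exact key_iff D a b MN hdec h2 h5 i (j - i) (by omega)

lemma dvd_sub1_iff (n k : Nat) (hn : 2 ≤ n) : n ∣ 10 ^ k - 1 ↔ 10 ^ k % n = 1 := by
  have hpow : 1 ≤ (10:Nat) ^ k := Nat.one_le_pow _ _ (by norm_num)
  rw [← Nat.modEq_iff_dvd' hpow]
  unfold Nat.ModEq
  rw [Nat.mod_eq_of_lt (by omega : 1 < n)]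
  exact eq_comm

lemma M1_of_zero (D a b MN : Nat) (hdec : D = 2 ^ a * 5 ^ b * MN)
    (h2 : ¬ 2 ∣ MN) (h5 : ¬ 5 ∣ MN) (k : Nat) (hz : aN D k = 0) : MN = 1 := by
  have hdvd : D ∣ 10 ^ k := Nat.dvd_of_mod_eq_zero hz
  have hMD : MN ∣ D := by rw [hdec]; exact Dvd.intro_left _ rfl
  have h1 : MN ∣ Nat.gcd MN (10 ^ k) := Nat.dvd_gcd dvd_rfl (hMD.trans hdvd)
  rw [copM10pow MN h2 h5 k] at h1
  exact Nat.dvd_one.mp h1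

lemma ord_dvd (MN L0 : Nat) (hMN : 2 ≤ MN) (hL0pos : 0 < L0) (hL0 : 10 ^ L0 % MN = 1)
    (hL0min : ∀ k, 0 < k → k < L0 → 10 ^ k % MN ≠ 1) :
    ∀ k, 10 ^ k % MN = 1 → L0 ∣ k := by
  intro k hk
  have hmod : 10 ^ (k % L0) % MN = 1 := by
    have h1 : (10:Nat) ^ L0 ≡ 1 [MOD MN] := by
      unfold Nat.ModEq
      rw [hL0, Nat.mod_eq_of_lt (by omega)]
    have h2 : (10:Nat) ^ (L0 * (k / L0) + k % L0) ≡ 1 ^ (k / L0) * 10 ^ (k % L0) [MOD MN] := by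
      rw [pow_add, pow_mul]
      exact Nat.ModEq.mul ((h1.pow (k / L0))) (Nat.ModEq.refl _)
    have h3 : L0 * (k / L0) + k % L0 = k := Nat.div_add_mod k L0
    rw [h3, one_pow, one_mul] at h2
    unfold Nat.ModEq at h2
    rw [← h2, hk]
  rcases Nat.eq_zero_or_pos (k % L0) with h | h
  · exact Nat.dvd_of_mod_eq_zero h
  · exact absurd hmod (hL0min _ h (Nat.mod_lt _ hL0pos))

lemma distinct_lt (D T : Nat) (hTmin : ∀ j, j < T → ¬ EV D j) :
    ∀ i j, i < j → j < T → aN D i ≠ aN D j := by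
  intro i j hij hjT h
  exact hTmin j hjT (Or.inr ⟨i, hij, h⟩)

lemma aN_zero (D : Nat) (hD : 2 ≤ D) : aN D 0 = 1 := by
  unfold aN; rw [pow_zero]; exact Nat.mod_eq_of_lt (by omega)

lemma aI_zero (d : Int) (hd : 2 ≤ d) : aI d 0 = 1 := by
  unfold aI; rw [aN_zero d.toNat (by omega)]; simp

lemma aI_inj (d : Int) (i j : Nat) : aI d i = aI d j ↔ aN d.toNat i = aN d.toNat j := by
  unfold aI; exact Nat.cast_inj

lemma zeroT_iff_M1 (D a b MN : Nat) (hD : 2 ≤ D) (hdec : D = 2 ^ a * 5 ^ b * MN)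
    (h2 : ¬ 2 ∣ MN) (h5 : ¬ 5 ∣ MN) (T : Nat) (hTev : EV D T)
    (hTmin : ∀ j, j < T → ¬ EV D j) :
    aN D (T+1) = 0 ↔ MN = 1 := by
  constructor
  · exact M1_of_zero D a b MN hdec h2 h5 (T+1)
  · intro hM1
    by_contra hz
    obtain ⟨i, hiT, heq⟩ := hTev.resolve_left hz
    obtain ⟨hE, -⟩ := (rep_iff D a b MN hdec h2 h5 i T hiT).mp heq
    have hDE : D = 2 ^ a * 5 ^ b := by rw [hdec, hM1, mul_one]
    have hzi : aN D i = 0 := by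
      unfold aN
      exact Nat.dvd_iff_mod_eq_zero.mp (hDE ▸ hE)
    cases i with
    | zero => rw [aN_zero D hD] at hzi; omega
    | succ i' => exact hTmin i' (by omega) (Or.inl hzi)

lemma TP_L0 (D a b MN : Nat) (hD : 2 ≤ D) (hdec : D = 2 ^ a * 5 ^ b * MN)
    (h2 : ¬ 2 ∣ MN) (h5 : ¬ 5 ∣ MN) (hMN : 2 ≤ MN)
    (T : Nat) (hTmin : ∀ j, j < T → ¬ EV D j)
    (P : Nat) (hP : P < T) (hPeq : aN D P = aN D T)
    (L0 : Nat) (hL0pos : 0 < L0) (hL0 : 10 ^ L0 % MN = 1)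
    (hL0min : ∀ k, 0 < k → k < L0 → 10 ^ k % MN ≠ 1) :
    T - P = L0 := by
  obtain ⟨hE, hMdvd⟩ := (rep_iff D a b MN hdec h2 h5 P T hP).mp hPeq
  have h1 : 10 ^ (T - P) % MN = 1 := (dvd_sub1_iff MN (T - P) hMN).mp hMdvd
  have hdv : L0 ∣ T - P := ord_dvd MN L0 hMN hL0pos hL0 hL0min (T - P) h1
  have hle : L0 ≤ T - P := Nat.le_of_dvd (by omega) hdv
  by_contra hne
  have hlt : L0 < T - P := by omega
  have hPL0 : aN D P = aN D (P + L0) := by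
    apply (rep_iff D a b MN hdec h2 h5 P (P + L0) (by omega)).mpr
    refine ⟨hE, ?_⟩
    rw [Nat.add_sub_cancel_left]
    exact (dvd_sub1_iff MN L0 hMN).mpr hL0
  exact hTmin (P + L0) (by omega) (Or.inr ⟨P, by omega, hPL0⟩)

lemma loop1_run (d : Int) (hd : 2 ≤ d) (T : Nat)
    (hTev : EV d.toNat T) (hTmin : ∀ j, j < T → ¬ EV d.toNat j) :
    ∀ (fuel j : Nat) (mp : PySem.Dict Int (Option Int)) (prev : Option Int),
      j ≤ T → T + 2 ≤ j + fuel →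
      (∀ x v, mp.get? x = some v → v = some (PySem.Int.mod (10 * x) d)) →
      (∀ x, (mp.get? x).isSome = true ↔ ∃ i, i < j ∧ aI d i = x) →
      ∃ mp', sfLoop1 d fuel (aI d j) prev mp false
          = (some (aI d T), mp', decide (aN d.toNat (T+1) ≠ 0))
        ∧ (aN d.toNat (T+1) ≠ 0 →
            (∀ x v, mp'.get? x = some v → v = some (PySem.Int.mod (10 * x) d))
          ∧ (∀ i, i ≤ T → ∃ v, mp'.get? (aI d i) = some v)) := by
  intro fuel
  induction fuel with
  | zero => intro j mp prev hjT hfuel _ _; omega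
  | succ f ih =>
    intro j mp prev hjT hfuel hval hkey
    simp only [sfLoop1, Bool.false_eq_true, if_false]
    rw [aI_step d hd j]
    rcases Nat.eq_or_lt_of_le hjT with rfl | hjlt
    · -- j = T : the event iteration
      by_cases hz : aN d.toNat (j+1) = 0
      · have hz' : aI d (j+1) = 0 := by unfold aI; exact Nat.cast_eq_zero.mpr hz
        rw [if_pos hz']
        refine ⟨mp.insert (aI d j) none, ?_, fun h => absurd hz h⟩
        simp [hz]
      · have hz' : aI d (j+1) ≠ 0 := by unfold aI; exact Nat.cast_ne_zero.mpr hz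
        rw [if_neg hz']
        have hmem : (mp.get? (aI d j)).isSome = true := by
          rw [hkey]
          obtain ⟨i, hiT, heq⟩ := hTev.resolve_left hz
          exact ⟨i, hiT, (aI_inj d i j).mpr heq⟩
        rw [hmem]
        have hf1 : ∃ f', f = f' + 1 := ⟨f - 1, by omega⟩
        obtain ⟨f', rfl⟩ := hf1
        refine ⟨mp.insert (aI d j) (some (aI d (j+1))), ?_, ?_⟩
        · simp only [sfLoop1, if_pos]
          simp [hz]
        · intro _
          constructor
          · intro x v hxv
            rw [PySem.Dict.get?_insert] at hxv
            split at hxv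
            · next heq =>
              subst heq
              obtain rfl := (Option.some.injEq _ _).mp hxv
              rw [aI_step d hd j]
            · exact hval x v hxv
          · intro i hiT
            rw [PySem.Dict.get?_insert]
            split
            · exact ⟨some (aI d (j+1)), rfl⟩
            · next hne =>
              rcases Nat.eq_or_lt_of_le hiT with rfl | hilt
              · exact absurd rfl hne
              · have := (hkey (aI d i)).mpr ⟨i, hilt, rfl⟩
                exact Option.isSome_iff_exists.mp this
    · -- j < T : no event, keep looping
      have hnoev : ¬ EV d.toNat j := hTmin j hjlt
      have hz : aN d.toNat (j+1) ≠ 0 := fun h => hnoev (Or.inl h)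
      have hz' : aI d (j+1) ≠ 0 := by unfold aI; exact Nat.cast_ne_zero.mpr hz
      rw [if_neg hz']
      have hmem : (mp.get? (aI d j)).isSome = false := by
        rw [Bool.eq_false_iff]
        intro h
        obtain ⟨i, hij, heq⟩ := (hkey _).mp h
        exact hnoev (Or.inr ⟨i, hij, (aI_inj d i j).mp heq⟩)
      rw [hmem]
      apply ih (j+1) (mp.insert (aI d j) (some (aI d (j+1)))) (some (aI d j))
        (by omega) (by omega)
      · intro x v hxv
        rw [PySem.Dict.get?_insert] at hxv
        split at hxv
        · next heq =>
          subst heq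
          obtain rfl := (Option.some.injEq _ _).mp hxv
          rw [aI_step d hd j]
        · exact hval x v hxv
      · intro x
        rw [PySem.Dict.get?_insert]
        constructor
        · intro h
          split at h
          · next heq => exact ⟨j, by omega, heq.symm⟩
          · obtain ⟨i, hij, heq⟩ := (hkey x).mp h
            exact ⟨i, by omega, heq⟩
        · rintro ⟨i, hij, rfl⟩
          split
          · rfl
          · next hne =>
            rcases Nat.lt_succ_iff_lt_or_eq.mp hij with h' | rfl
            · exact (hkey _).mpr ⟨i, h', rfl⟩
            · exact absurd rfl hne

lemma walk_run (d : Int) (hd : 2 ≤ d) (mp : PySem.Dict Int (Option Int))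
    (hval : ∀ x v, mp.get? x = some v → v = some (PySem.Int.mod (10 * x) d))
    (T : Nat) (hkeys : ∀ i, i ≤ T → ∃ v, mp.get? (aI d i) = some v) :
    ∀ (k s fuel : Nat) (acc : List Int),
      k + 1 ≤ fuel → s + k ≤ T →
      (∀ jj, jj < k → aN d.toNat (s+jj) ≠ aN d.toNat T) →
      aN d.toNat (s+k) = aN d.toNat T →
      ∃ l, sfWalk d mp (some (aI d T)) fuel (some (aI d s)) acc = (some (aI d T), l)
         ∧ l.length = acc.length + k := by
  intro k
  induction k with
  | zero =>
    intro s fuel acc hf hsT hne heq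
    obtain ⟨f, rfl⟩ : ∃ f, fuel = f + 1 := ⟨fuel - 1, by omega⟩
    have hstop : aI d s = aI d T := (aI_inj d s T).mpr (by simpa using heq)
    simp only [sfWalk, hstop, if_pos]
    exact ⟨acc, rfl, by omega⟩
  | succ k ih =>
    intro s fuel acc hf hsT hne heq
    obtain ⟨f, rfl⟩ : ∃ f, fuel = f + 1 := ⟨fuel - 1, by omega⟩
    have hstop : aI d s ≠ aI d T := fun h =>
      hne 0 (by omega) (by simpa using (aI_inj d s T).mp h)
    simp only [sfWalk]
    rw [if_neg (by simpa using hstop)]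
    obtain ⟨v0, hv0⟩ := hkeys s (by omega)
    have hv0' : v0 = some (aI d (s+1)) := by
      rw [hval _ _ hv0, aI_step d hd s]
    rw [hv0, hv0']
    simp only [Option.getD_some]
    obtain ⟨l, hl, hlen⟩ := ih (s+1) f (acc ++ [PySem.Int.floordiv (10 * aI d s) d])
      (by omega) (by omega)
      (fun jj hjj => by
        have := hne (jj+1) (by omega)
        simpa [Nat.add_assoc, Nat.add_comm 1 jj] using this)
      (by
        have : s + 1 + k = s + (k+1) := by omega
        rw [this]; exact heq)
    refine ⟨l, hl, ?_⟩
    simp only [List.length_append, List.length_cons, List.length_nil] at hlen ⊢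
    omega

lemma stripFac_spec (p : Int) (hp : 2 ≤ p) :
    ∀ (fuel : Nat) (m : Int), 0 < m → m.toNat ≤ fuel →
      ¬ (p ∣ stripFac p fuel m) ∧ 0 < stripFac p fuel m ∧
      ∃ e : Nat, m = p ^ e * stripFac p fuel m := by
  intro fuel
  induction fuel with
  | zero => intro m hm hf; omega
  | succ f ih =>
    intro m hm hf
    simp only [stripFac]
    by_cases hdvd : PySem.Int.mod m p = 0
    · rw [if_pos hdvd]
      have hpd : p ∣ m := (PySem.Int.mod_eq_zero_iff_dvd m p).mp hdvd
      obtain ⟨c, rfl⟩ := hpd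
      have hc : 0 < c := by
        by_contra h
        push Not at h
        nlinarith
      have hdivq : PySem.Int.floordiv (p * c) p = c := by
        rw [PySem.Int.floordiv_eq_ediv_of_pos (show (0:Int) < p by omega)]
        exact Int.mul_ediv_cancel_left c (by omega)
      have h2c : 2 * c ≤ p * c := by nlinarith
      have hct : c.toNat ≤ f := by omega
      rw [hdivq]
      obtain ⟨h1, h2, e, he⟩ := ih c hc hct
      refine ⟨h1, h2, e + 1, ?_⟩
      conv_lhs => rw [he]
      ring
    · rw [if_neg hdvd]
      refine ⟨fun h => hdvd ((PySem.Int.mod_eq_zero_iff_dvd m p).mpr h), hm, 0, by ring⟩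

lemma ordLoop_run (MN L0 : Nat) (hMN : 2 ≤ MN) (hL0pos : 0 < L0)
    (hL0 : 10 ^ L0 % MN = 1) (hL0min : ∀ k, 0 < k → k < L0 → 10 ^ k % MN ≠ 1) :
    ∀ (fuel j : Nat), 1 ≤ j → j ≤ L0 → L0 ≤ j + fuel →
      ordLoop (MN : Int) fuel ((10 ^ j % MN : Nat) : Int) (j : Int) = (L0 : Int) := by
  intro fuel
  induction fuel with
  | zero =>
    intro j h1 h2 h3
    have : j = L0 := by omega
    subst this
    simp only [ordLoop]
  | succ f ih =>
    intro j h1 h2 h3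
    simp only [ordLoop]
    by_cases hj : j = L0
    · subst hj
      rw [hL0]
      simp
    · have hjlt : j < L0 := by omega
      have hne : 10 ^ j % MN ≠ 1 := hL0min j (by omega) hjlt
      rw [if_neg (by exact_mod_cast fun h => hne (by exact_mod_cast h))]
      have hstep : PySem.Int.mod (10 * ((10 ^ j % MN : Nat) : Int)) (MN : Int)
          = ((10 ^ (j+1) % MN : Nat) : Int) := by
        rw [PySem.Int.mod_eq_emod_of_pos (show (0:Int) < (MN:Int) by omega)]
        have := aN_succ MN j
        unfold aN at this
        rw [this]
        norm_cast
      rw [hstep]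
      have hcast : (j : Int) + 1 = ((j+1 : Nat) : Int) := by push_cast; ring
      rw [hcast]
      exact ih (j+1) (by omega) (by omega) (by omega)

lemma cycleLen_eq (d : Int) (hd : 2 ≤ d) :
    ((split_fraction d).2.length : Int) = cycleLenAlt d := by
  have hD : 2 ≤ d.toNat := by omega
  obtain ⟨h2nd, hm1pos, e2, hm1eq⟩ :=
    stripFac_spec 2 (by norm_num) (d.toNat + 2) d (by omega) (by omega)
  have hm1le : (stripFac 2 (d.toNat + 2) d).toNat ≤ d.toNat + 2 := by
    have hpow : (0:Int) < 2 ^ e2 := pow_pos (by norm_num) _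
    have hle : stripFac 2 (d.toNat + 2) d ≤ d := by
      calc stripFac 2 (d.toNat + 2) d = 1 * stripFac 2 (d.toNat + 2) d := (one_mul _).symm
        _ ≤ 2 ^ e2 * stripFac 2 (d.toNat + 2) d :=
            mul_le_mul_of_nonneg_right (by omega) (by omega)
        _ = d := hm1eq.symm
    omega
  obtain ⟨h5nd, hMpos, e5, hMeq⟩ :=
    stripFac_spec 5 (by norm_num) (d.toNat + 2) (stripFac 2 (d.toNat + 2) d) hm1pos hm1le
  set Mi := stripFac 5 (d.toNat + 2) (stripFac 2 (d.toNat + 2) d) with hMidef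
  set MN := Mi.toNat with hMNdef
  have hMi : Mi = (MN : Int) := (Int.toNat_of_nonneg hMpos.le).symm
  have hdecI : d = 2 ^ e2 * 5 ^ e5 * Mi := by
    calc d = 2 ^ e2 * stripFac 2 (d.toNat + 2) d := hm1eq
      _ = 2 ^ e2 * (5 ^ e5 * Mi) := by rw [hMeq]
      _ = 2 ^ e2 * 5 ^ e5 * Mi := by ring
  have hdecN : d.toNat = 2 ^ e2 * 5 ^ e5 * MN := by
    have h1 : d = ((2 ^ e2 * 5 ^ e5 * MN : Nat) : Int) := by rw [hdecI, hMi]; push_cast; ring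
    rw [h1, Int.toNat_natCast]
  have h2M : ¬ 2 ∣ MN := by
    intro hdvd
    apply h2nd
    rw [hMeq]
    exact Dvd.dvd.mul_left (by rw [hMi]; exact_mod_cast Int.natCast_dvd_natCast.mpr hdvd) _
  have h5M : ¬ 5 ∣ MN := by
    intro hdvd
    apply h5nd
    rw [hMi]
    exact_mod_cast Int.natCast_dvd_natCast.mpr hdvd
  have hMN1 : 1 ≤ MN := by omega
  obtain ⟨i0, j0, hij0, hj0, hrep0⟩ := pigeon d.toNat (by omega)
  have hEVex : ∃ j, EV d.toNat j := ⟨j0, Or.inr ⟨i0, hij0, hrep0⟩⟩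
  haveI : DecidablePred (EV d.toNat) := fun j => by unfold EV; infer_instance
  set T := Nat.find hEVex with hTdef
  have hTev : EV d.toNat T := Nat.find_spec hEVex
  have hTmin : ∀ j, j < T → ¬ EV d.toNat j := fun j hj => Nat.find_min hEVex hj
  have hTle : T ≤ d.toNat := le_trans (Nat.find_min' hEVex (Or.inr ⟨i0, hij0, hrep0⟩)) hj0
  obtain ⟨mp', hrun, hspec⟩ := loop1_run d hd T hTev hTmin (d.toNat + 2) 0 PySem.Dict.empty none
    (by omega) (by omega)
    (by intro x v h; rw [PySem.Dict.get?_empty] at h; cases h)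
    (by intro x; rw [PySem.Dict.get?_empty]; simp)
  rw [aI_zero d hd] at hrun
  by_cases hz : aN d.toNat (T+1) = 0
  · -- terminating decimal: A's loop list is []; B's stripped part is 1
    have hMN1' : MN = 1 := (zeroT_iff_M1 d.toNat e2 e5 MN hD hdecN h2M h5M T hTev hTmin).mp hz
    have hflag : decide (aN d.toNat (T+1) ≠ 0) = false := by simp [hz]
    rw [hflag] at hrun
    have hA : (split_fraction d).2 = [] := by
      unfold split_fraction
      simp [hrun]
    rw [hA]
    have hMi1 : Mi = 1 := by rw [hMi, hMN1']; rfl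
    unfold cycleLenAlt
    rw [← hMidef, if_pos hMi1]
    rfl
  · -- repeating decimal: A's loop has length T - P = L0 = B's order loop
    have hMNne1 : MN ≠ 1 := fun h =>
      hz ((zeroT_iff_M1 d.toNat e2 e5 MN hD hdecN h2M h5M T hTev hTmin).mpr h)
    have hMN2 : 2 ≤ MN := by omega
    obtain ⟨i1, j1, hij1, hj1, hrep1⟩ := pigeon MN (by omega)
    have hrep1' : aN MN i1 = aN MN j1 := hrep1
    have hMdvd1 : MN ∣ 10 ^ (j1 - i1) - 1 :=
      ((rep_iff MN 0 0 MN (by ring) h2M h5M i1 j1 hij1).mp hrep1').2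
    have hordex : ∃ L, 0 < L ∧ 10 ^ L % MN = 1 :=
      ⟨j1 - i1, by omega, (dvd_sub1_iff MN (j1 - i1) hMN2).mp hMdvd1⟩
    set L0 := Nat.find hordex with hL0def
    obtain ⟨hL0pos, hL0⟩ := Nat.find_spec hordex
    have hL0min : ∀ k, 0 < k → k < L0 → 10 ^ k % MN ≠ 1 :=
      fun k hk1 hk2 hk3 => Nat.find_min hordex hk2 ⟨hk1, hk3⟩
    have hL0le : L0 ≤ MN :=
      le_trans (Nat.find_min' hordex
        ⟨by omega, (dvd_sub1_iff MN (j1 - i1) hMN2).mp hMdvd1⟩) (by omega)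
    obtain ⟨P, hP, hPeq⟩ := hTev.resolve_left hz
    have hTP : T - P = L0 :=
      TP_L0 d.toNat e2 e5 MN hD hdecN h2M h5M hMN2 T hTmin P hP hPeq L0 hL0pos hL0 hL0min
    obtain ⟨hval, hkeys⟩ := hspec hz
    have hflag : decide (aN d.toNat (T+1) ≠ 0) = true := by simp [hz]
    rw [hflag] at hrun
    -- the head-digits walk stops at loop_start after P steps
    obtain ⟨head, hswh, hlenh⟩ := walk_run d hd mp' hval T hkeys P 0 (d.toNat + 2) []
      (by omega) (by omega)
      (fun jj hjj h => by
        have h' : aN d.toNat jj = aN d.toNat P := by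
          have : aN d.toNat (0 + jj) = aN d.toNat T := h
          rw [Nat.zero_add] at this
          rw [this, hPeq]
        exact distinct_lt d.toNat T hTmin jj P hjj hP h')
      (by rw [Nat.zero_add]; exact hPeq)
    rw [aI_zero d hd] at hswh
    -- the n_map entry at the loop start
    obtain ⟨v0, hv0⟩ := hkeys T le_rfl
    have hv0' : v0 = some (aI d (T+1)) := by
      have := hval _ _ hv0
      rw [aI_step d hd T] at this
      exact this
    have hTP1 : aI d (T+1) = aI d (P+1) := by
      rw [aI_inj, aN_succ d.toNat T, aN_succ d.toNat P, hPeq]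
    -- the loop-digits walk returns to loop_start after T - P - 1 more steps
    obtain ⟨loopl, hswl, hlenl⟩ := walk_run d hd mp' hval T hkeys (T - P - 1) (P+1)
      (d.toNat + 2) [PySem.Int.floordiv (10 * aI d T) d]
      (by omega) (by omega)
      (fun jj hjj h => by
        have h' : aN d.toNat P = aN d.toNat (P+1+jj) := hPeq.trans h.symm
        exact distinct_lt d.toNat T hTmin P (P+1+jj) (by omega) (by omega) h')
      (by
        have he : P + 1 + (T - P - 1) = T := by omega
        rw [he])
    have hA : (split_fraction d).2 = loopl := by
      unfold split_fraction
      simp [hrun, hswh, hv0, hv0', hTP1, hswl]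
    rw [hA]
    have hlen : loopl.length = L0 := by
      simp only [List.length_cons, List.length_nil] at hlenl
      omega
    rw [hlen]
    -- B's side: the order loop counts to L0
    have hMine1 : Mi ≠ 1 := by
      rw [hMi]
      exact_mod_cast fun h => hMNne1 (by exact_mod_cast h)
    unfold cycleLenAlt
    rw [← hMidef, if_neg hMine1, hMi]
    have hentry : PySem.Int.mod 10 ((MN : Nat) : Int) = ((10 ^ 1 % MN : Nat) : Int) := by
      rw [PySem.Int.mod_eq_emod_of_pos (show (0:Int) < (MN : Int) by omega)]
      norm_cast
    rw [Int.toNat_natCast, hentry]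
    have h1 : (1 : Int) = ((1 : Nat) : Int) := rfl
    rw [h1]
    exact (ordLoop_run MN L0 hMN2 hL0pos hL0 hL0min (MN + 2) 1 le_rfl (by omega) (by omega)).symm

-- ===== VERDICT (by name: the statement is the Claim_ definition above) =====
theorem denom_with_largest_cycle_spec : Claim_equal_denom_with_largest_cycle := by
  intro ub _
  unfold Spec_denom_with_largest_cycle denom_with_largest_cycle denom_with_largest_cycle_alt
  congr 1
  apply PySem.List.foldl_congr_mem
  intro acc x hx
  have hx2 : 2 ≤ x := ((PySem.List.mem_pyRange_one).1 hx).1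
  simp only [cycleLen_eq x hx2]
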